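-- pv_equiv track=rewrite | github.com/ak-maker/lnm | script.py | extract_headings_from_toc
-- ===== SOURCE A (Python) =====
-- def extract_headings_from_toc(lines):
--     toc = False
--     headings = set()
--     intro_content = []
--     for line in lines:
--         if '# Table of Contents' in line:
--             toc = True
--             continue
--         if not toc:
--             intro_content.append(line)
--         else:
--             if line.startswith('# ') and not '# Table of Contents' in line:
--                 break
--             if line.strip().startswith('#'):
--                 headings.add(line.strip())
--     return headings, intro_content
-- ===== SOURCE B (Python) =====
-- def extract_headings_from_toc(lines):
--     MARK = '# Table of Contents'
--     marks = [i for i, l in enumerate(lines) if MARK in l]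
--     if not marks:
--         return set(), list(lines)
--     tail = lines[marks[0] + 1:]
--     stops = [i for i, l in enumerate(tail) if l.startswith('# ') and MARK not in l]
--     kept = tail[:stops[0]] if stops else tail
--     headings = {l.strip() for l in kept
--                 if MARK not in l and l.strip().startswith('#')}
--     return headings, lines[:marks[0]]
-- ===== Notes on version B (the rewrite author's own statement) =====
-- stated objective: alternative
-- what changed: Replaces A's single-pass boolean state machine with continue/break by staged declarative passes: build the list of all marker positions, slice the tail after the first one, build the list of all stop positions in it, slice again at the first stop, and collect headings with a set comprehension over the kept lines.
import Mathlib
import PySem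

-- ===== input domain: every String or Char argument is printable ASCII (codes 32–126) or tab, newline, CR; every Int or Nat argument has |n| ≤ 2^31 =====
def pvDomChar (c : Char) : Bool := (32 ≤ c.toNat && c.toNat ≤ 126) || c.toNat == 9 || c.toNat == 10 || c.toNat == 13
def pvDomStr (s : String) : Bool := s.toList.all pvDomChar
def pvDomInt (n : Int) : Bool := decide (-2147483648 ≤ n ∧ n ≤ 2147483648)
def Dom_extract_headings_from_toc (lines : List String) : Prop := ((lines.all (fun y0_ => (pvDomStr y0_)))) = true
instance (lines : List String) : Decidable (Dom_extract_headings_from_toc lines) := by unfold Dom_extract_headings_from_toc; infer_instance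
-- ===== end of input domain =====

-- B replaces A's single-pass boolean state machine (continue/break) by staged declarative passes:
-- list all marker positions, slice the tail, list all stop positions, slice again, then a set
-- comprehension over the kept lines; objective: alternative decomposition, same cost.


-- ===== PORT A =====
-- A's loop with its `toc` flag, mutable set/list and the early `break`, as structural recursion over the lines.
def ehGoA : List String → Bool → List String → List String → List String × List String
  | [], _, headings, intro => (headings, intro)
  | l :: ls, toc, headings, intro =>
    if PySem.Str.isIn "# Table of Contents" l then
      ehGoA ls true headings intro            -- toc = True; continue
    else if !toc then
      ehGoA ls toc headings (intro ++ [l])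
    else if PySem.Str.startswith l "# " && !(PySem.Str.isIn "# Table of Contents" l) then
      (headings, intro)                       -- break
    else if PySem.Str.startswith (PySem.Str.strip l) "#" then
      ehGoA ls toc (PySem.Set.add headings (PySem.Str.strip l)) intro
    else
      ehGoA ls toc headings intro

def extract_headings_from_toc (lines : List String) : List String × List String :=
  ehGoA lines false PySem.Set.empty []

-- ===== PORT B =====
-- B's staged passes. `ehMarksB lines` = [i for i, l in enumerate(lines) if MARK in l].
def ehMarksB (lines : List String) : List Int :=
  ((PySem.List.enumerate lines).filter
      (fun p => PySem.Str.isIn "# Table of Contents" p.2)).map (fun p => p.1)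

-- stops = [i for i, l in enumerate(tail) if l.startswith('# ') and MARK not in l]
def ehStopsB (tail : List String) : List Int :=
  ((PySem.List.enumerate tail).filter
      (fun p => PySem.Str.startswith p.2 "# " && !PySem.Str.isIn "# Table of Contents" p.2)).map (fun p => p.1)

-- {l.strip() for l in kept if MARK not in l and l.strip().startswith('#')}
def ehHeadingsB (kept : List String) : List String :=
  (kept.filter (fun l =>
      !PySem.Str.isIn "# Table of Contents" l &&
      PySem.Str.startswith (PySem.Str.strip l) "#")).foldl
    (fun h l => PySem.Set.add h (PySem.Str.strip l)) PySem.Set.empty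

def extract_headings_from_toc_alt (lines : List String) : List String × List String :=
  match ehMarksB lines with
  | [] => (PySem.Set.empty, lines)
  | m :: _ =>
    let tail := PySem.List.slice lines (some (m + 1)) none
    let kept := match ehStopsB tail with
      | [] => tail
      | s :: _ => PySem.List.slice tail none (some s)
    (ehHeadingsB kept, PySem.List.slice lines none (some m))

-- ===== PRECONDITION & SPEC =====
def Spec_extract_headings_from_toc (lines : List String) (out : List String × List String) : Prop := out = extract_headings_from_toc_alt lines
instance (lines : List String) (out : List String × List String) : Decidable (Spec_extract_headings_from_toc lines out) := by unfold Spec_extract_headings_from_toc; infer_instance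

-- ===== CLAIM (what is proved, stated in full; the proofs are below) =====
def Claim_equal_extract_headings_from_toc : Prop := ∀ (lines : List String), Dom_extract_headings_from_toc lines → Spec_extract_headings_from_toc lines (extract_headings_from_toc lines)

-- ===== LEMMAS AND PROOFS =====

-- A's tail scan after the marker, as its own recursion (proof helper).
def ehScanA : List String → List String → List String
  | [], headings => headings
  | l :: ls, headings =>
    if PySem.Str.isIn "# Table of Contents" l then ehScanA ls headings
    else if PySem.Str.startswith l "# " then headings       -- break
    else if PySem.Str.startswith (PySem.Str.strip l) "#" then
      ehScanA ls (PySem.Set.add headings (PySem.Str.strip l))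
    else ehScanA ls headings

-- After the toc flag is set, A's loop computes the tail scan (intro is frozen).
lemma ehGoA_true (ls : List String) : ∀ (h intro : List String),
    ehGoA ls true h intro = (ehScanA ls h, intro) := by
  induction ls with
  | nil => intro h intro; rfl
  | cons l ls ih =>
    intro h intro
    simp only [ehGoA, ehScanA, Bool.not_true, Bool.false_eq_true, if_false,
      Bool.and_eq_true, Bool.not_eq_true']
    split_ifs <;> simp_all

-- Before the marker is seen, A accumulates intro; characterised by findIdx? of the marker.
lemma ehGoA_false (ls : List String) : ∀ (intro : List String),
    ehGoA ls false PySem.Set.empty intro =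
      match ls.findIdx? (fun l => PySem.Str.isIn "# Table of Contents" l) with
      | none => (PySem.Set.empty, intro ++ ls)
      | some i => (ehScanA (ls.drop (i + 1)) PySem.Set.empty, intro ++ ls.take i) := by
  induction ls with
  | nil => intro intro; simp [ehGoA]
  | cons l ls ih =>
    intro intro
    simp only [ehGoA, List.findIdx?_cons, Bool.not_false, if_true]
    split_ifs with hm
    · simp [ehGoA_true]
    · simp only [ih]
      cases hfi : ls.findIdx? (fun l => PySem.Str.isIn "# Table of Contents" l) with
      | none => simp
      | some i => simp [List.take_succ_cons]

-- The head of a filtered-enumerate index list is findIdx?.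
lemma enum_filter_head (q : String → Bool) : ∀ (xs : List String) (s : Int),
    ((((PySem.List.enumerate xs s).filter (fun p => q p.2)).map (fun p => p.1))).head? =
      (xs.findIdx? q).map (fun i => s + (i : Int)) := by
  intro xs
  induction xs with
  | nil => intro s; simp [PySem.List.enumerate_nil]
  | cons x xs ih =>
    intro s
    simp only [PySem.List.enumerate_cons, List.filter_cons, List.findIdx?_cons]
    by_cases hq : q x
    · simp [hq]
    · simp only [hq, if_false, Bool.false_eq_true, ih (s + 1)]
      cases xs.findIdx? q <;> simp <;> omega

-- A's tail scan equals B's slice-at-first-stop + filtered fold.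
lemma ehScanA_eq : ∀ (ls h : List String),
    ehScanA ls h =
      ((match ls.findIdx? (fun l => PySem.Str.startswith l "# " &&
            !PySem.Str.isIn "# Table of Contents" l) with
        | none => ls
        | some s => ls.take s).filter (fun l =>
            !PySem.Str.isIn "# Table of Contents" l &&
            PySem.Str.startswith (PySem.Str.strip l) "#")).foldl
        (fun h l => PySem.Set.add h (PySem.Str.strip l)) h := by
  intro ls
  induction ls with
  | nil => intro h; simp [ehScanA]
  | cons l ls ih =>
    intro h
    rw [List.findIdx?_cons]
    by_cases hm : PySem.Str.isIn "# Table of Contents" l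
    · have hq : (PySem.Str.startswith l "# " && !PySem.Str.isIn "# Table of Contents" l) = false := by
        rw [hm]; simp
      have hc : (!PySem.Str.isIn "# Table of Contents" l &&
          PySem.Str.startswith (PySem.Str.strip l) "#") = false := by rw [hm]; simp
      rw [hq]
      simp only [Bool.false_eq_true, if_false]
      cases hfi2 : ls.findIdx? (fun l => PySem.Str.startswith l "# " &&
          !PySem.Str.isIn "# Table of Contents" l) with
      | none =>
        simp only [Option.map_none, List.filter_cons, hc, Bool.false_eq_true, if_false]
        simp only [ehScanA, hm, if_true, ih, hfi2]
      | some s =>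
        simp only [Option.map_some, List.take_succ_cons, List.filter_cons, hc,
          Bool.false_eq_true, if_false]
        simp only [ehScanA, hm, if_true, ih, hfi2]
    · by_cases hs : PySem.Str.startswith l "# "
      · have hq : (PySem.Str.startswith l "# " && !PySem.Str.isIn "# Table of Contents" l) = true := by
          rw [hs, Bool.eq_false_iff.mpr hm]; simp
        rw [hq]
        simp only [if_true, List.take_zero, List.filter_nil, List.foldl_nil]
        simp only [ehScanA, hm, hs, Bool.false_eq_true, if_false, if_true]
      · have hq : (PySem.Str.startswith l "# " && !PySem.Str.isIn "# Table of Contents" l) = false := by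
          rw [Bool.eq_false_iff.mpr hs]; simp
        rw [hq]
        simp only [Bool.false_eq_true, if_false]
        by_cases hh : PySem.Str.startswith (PySem.Str.strip l) "#"
        · have hc : (!PySem.Str.isIn "# Table of Contents" l &&
              PySem.Str.startswith (PySem.Str.strip l) "#") = true := by
            rw [Bool.eq_false_iff.mpr hm, hh]; simp
          cases hfi2 : ls.findIdx? (fun l => PySem.Str.startswith l "# " &&
              !PySem.Str.isIn "# Table of Contents" l) with
          | none =>
            simp only [Option.map_none, List.filter_cons, hc, if_true, List.foldl_cons]
            simp only [ehScanA, hm, hs, hh, Bool.false_eq_true, if_false, if_true, ih, hfi2]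
          | some s =>
            simp only [Option.map_some, List.take_succ_cons, List.filter_cons, hc, if_true,
              List.foldl_cons]
            simp only [ehScanA, hm, hs, hh, Bool.false_eq_true, if_false, if_true, ih, hfi2]
        · have hc : (!PySem.Str.isIn "# Table of Contents" l &&
              PySem.Str.startswith (PySem.Str.strip l) "#") = false := by
            rw [Bool.eq_false_iff.mpr hh]; simp
          cases hfi2 : ls.findIdx? (fun l => PySem.Str.startswith l "# " &&
              !PySem.Str.isIn "# Table of Contents" l) with
          | none =>
            simp only [Option.map_none, List.filter_cons, hc, Bool.false_eq_true, if_false]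
            simp only [ehScanA, hm, hs, hh, Bool.false_eq_true, if_false, ih, hfi2]
          | some s =>
            simp only [Option.map_some, List.take_succ_cons, List.filter_cons, hc,
              Bool.false_eq_true, if_false]
            simp only [ehScanA, hm, hs, hh, Bool.false_eq_true, if_false, ih, hfi2]

-- enum_filter_head specialised to B's stop predicate (the lambda shape rw can match).
lemma enum_filter_head_stop (xs : List String) (s : Int) :
    ((((PySem.List.enumerate xs s).filter (fun p =>
        PySem.Str.startswith p.2 "# " && !PySem.Str.isIn "# Table of Contents" p.2)).map
        (fun p => p.1))).head? =
      (xs.findIdx? (fun l =>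
        PySem.Str.startswith l "# " && !PySem.Str.isIn "# Table of Contents" l)).map
        (fun i => s + (i : Int)) :=
  enum_filter_head (fun l => PySem.Str.startswith l "# " && !PySem.Str.isIn "# Table of Contents" l) xs s

-- ===== VERDICT =====
theorem extract_headings_from_toc_spec : Claim_equal_extract_headings_from_toc := by
  intro lines _
  unfold Spec_extract_headings_from_toc extract_headings_from_toc extract_headings_from_toc_alt
  rw [ehGoA_false]
  cases hfi : lines.findIdx? (fun l => PySem.Str.isIn "# Table of Contents" l) with
  | none =>
    have h1 : ehMarksB lines = [] := by
      rw [ehMarksB, ← List.head?_eq_none_iff, enum_filter_head, hfi]; rfl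
    rw [h1]
    rfl
  | some i =>
    have hmh : (ehMarksB lines).head? = some ((i : Nat) : Int) := by
      rw [ehMarksB, enum_filter_head, hfi]
      simp
    obtain ⟨rest, h1⟩ : ∃ rest, ehMarksB lines = (i : Int) :: rest := by
      cases hmk : ehMarksB lines with
      | nil => rw [hmk] at hmh; simp at hmh
      | cons m rest =>
        rw [hmk] at hmh
        simp only [List.head?_cons, Option.some.injEq] at hmh
        exact ⟨rest, by rw [hmh]⟩
    rw [h1]
    have htail : PySem.List.slice lines (some ((i : Int) + 1)) none = lines.drop (i + 1) := by
      rw [show ((i : Int) + 1) = ((i + 1 : Nat) : Int) by push_cast; ring,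
        PySem.List.slice_from_natCast]
    have hintro : PySem.List.slice lines none (some (i : Int)) = lines.take i :=
      PySem.List.slice_to_natCast ..
    simp only [htail, hintro, ehScanA_eq]
    cases hfs : (lines.drop (i + 1)).findIdx?
        (fun l => PySem.Str.startswith l "# " && !PySem.Str.isIn "# Table of Contents" l) with
    | none =>
      have h2 : ehStopsB (lines.drop (i + 1)) = [] := by
        rw [ehStopsB, ← List.head?_eq_none_iff, enum_filter_head_stop, hfs]; rfl
      rw [h2, ehHeadingsB]
      rfl
    | some s =>
      have hsh : (ehStopsB (lines.drop (i + 1))).head? = some ((s : Nat) : Int) := by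
        rw [ehStopsB, enum_filter_head_stop, hfs]
        simp
      obtain ⟨rest2, h2⟩ : ∃ rest2, ehStopsB (lines.drop (i + 1)) = (s : Int) :: rest2 := by
        cases hst : ehStopsB (lines.drop (i + 1)) with
        | nil => rw [hst] at hsh; simp at hsh
        | cons m rest2 =>
          rw [hst] at hsh
          simp only [List.head?_cons, Option.some.injEq] at hsh
          exact ⟨rest2, by rw [hsh]⟩
      rw [h2]
      simp only [PySem.List.slice_to_natCast, ehHeadingsB]
      rfl
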